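-- pv_equiv track=rewrite | github.com/tothedarktowercame/futon3 | scripts/make_devmaps_tex.py | normalize_quotes
-- ===== SOURCE A (Python) =====
-- def normalize_quotes(text: str) -> str:
--     result: list[str] = []
--     backtick_open = False
--     for ch in text:
--         if ch == "`":
--             if backtick_open:
--                 result.append("\u2019")
--             else:
--                 result.append("\u2018")
--             backtick_open = not backtick_open
--         elif ch == "'":
--             result.append("\u2019")
--         else:
--             result.append(ch)
--     if backtick_open:
--         result.append("\u2019")
--     return "".join(result)
-- ===== SOURCE B (Python) =====
-- def normalize_quotes(text: str) -> str:
--     s = "".join("\u2019" if c == "'" else c for c in text)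
--     parts = s.split("`")
--     pieces = [parts[0]]
--     for i, seg in enumerate(parts[1:]):
--         pieces.append("\u2018" if i % 2 == 0 else "\u2019")
--         pieces.append(seg)
--     if len(parts) % 2 == 0:
--         pieces.append("\u2019")
--     return "".join(pieces)
-- ===== Notes on version B (the rewrite author's own statement) =====
-- stated objective: alternative
-- what changed: Replaces A's single stateful character loop (boolean backtick flag) with a pipeline: map apostrophes in one pass, split on backticks, interleave alternating open/close quotes over the segments, and append a closing quote when the backtick count is odd.
import Mathlib
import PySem

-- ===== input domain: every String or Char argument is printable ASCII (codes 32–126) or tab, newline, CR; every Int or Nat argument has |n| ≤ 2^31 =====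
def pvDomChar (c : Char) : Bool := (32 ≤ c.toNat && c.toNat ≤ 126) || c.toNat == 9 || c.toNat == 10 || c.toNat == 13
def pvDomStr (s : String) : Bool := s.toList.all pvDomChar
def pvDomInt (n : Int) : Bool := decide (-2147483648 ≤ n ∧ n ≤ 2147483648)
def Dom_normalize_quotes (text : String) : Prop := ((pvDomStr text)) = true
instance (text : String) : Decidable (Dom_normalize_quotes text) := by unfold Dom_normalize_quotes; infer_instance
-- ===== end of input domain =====

-- B rewrites A's one stateful loop as a map + split-on-backtick + interleave pipeline (alternative decomposition, same cost).

-- ===== PORT A =====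
-- literal transliteration of A: one pass, accumulator list + backtick_open flag, final dangling close quote
def normalize_quotes (text : String) : String :=
  let st := text.toList.foldl
    (fun (st : List Char × Bool) ch =>
      if ch = '`' then
        (st.1 ++ [if st.2 then '’' else '‘'], !st.2)
      else if ch = '\'' then
        (st.1 ++ ['’'], st.2)
      else
        (st.1 ++ [ch], st.2))
    ([], false)
  let res := if st.2 then st.1 ++ ['’'] else st.1
  String.mk res

-- ===== PORT B =====
-- transliteration of Source B: apostrophe map, split on '`' (Python str.split with one-char sep
-- = List.splitOnP (· == '`') on the characters, exact), interleave alternating quotes, dangling close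
def normalize_quotes_alt (text : String) : String :=
  let s := text.toList.map (fun c => if c = '\'' then '’' else c)
  let parts := List.splitOnP (fun x => x == '`') s
  let pieces : List (List Char) := [parts.headD []]
  let pieces := (parts.tail.zipIdx.foldl
    (fun (acc : List (List Char)) (p : List Char × Nat) =>
      acc ++ [if p.2 % 2 == 0 then ['‘'] else ['’']] ++ [p.1]) pieces)
  let pieces := if parts.length % 2 == 0 then pieces ++ [['’']] else pieces
  String.mk pieces.flatten

-- ===== PRECONDITION & SPEC =====
def Spec_normalize_quotes (text : String) (out : String) : Prop := out = normalize_quotes_alt text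
instance (text : String) (out : String) : Decidable (Spec_normalize_quotes text out) := by unfold Spec_normalize_quotes; infer_instance

-- ===== CLAIM (what is proved, stated in full; the proofs are below) =====
def Claim_equal_normalize_quotes : Prop := ∀ (text : String), Dom_normalize_quotes text → Spec_normalize_quotes text (normalize_quotes text)

-- ===== LEMMAS AND PROOFS =====

-- common recursive specification: output chars for remaining input `l` at backtick parity `b`
def gSpec : List Char → Bool → List Char
  | [], _ => []
  | c :: t, b =>
    if c = '`' then (if b then '\u2019' else '\u2018') :: gSpec t (!b)
    else (if c = '\'' then '\u2019' else c) :: gSpec t b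

-- A's fold characterised: output so far, and the flag is the parity of backticks seen
theorem foldA_eq (l : List Char) (acc : List Char) (b : Bool) :
    l.foldl
      (fun (st : List Char × Bool) ch =>
        if ch = '`' then
          (st.1 ++ [if st.2 then '\u2019' else '\u2018'], !st.2)
        else if ch = '\'' then
          (st.1 ++ ['\u2019'], st.2)
        else
          (st.1 ++ [ch], st.2))
      (acc, b)
    = (acc ++ gSpec l b, b ^^ (l.count '`' % 2 == 1)) := by
  induction l generalizing acc b with
  | nil => simp [gSpec]
  | cons c t ih =>
    by_cases hc : c = '`'
    · subst hc
      simp only [List.foldl_cons, if_pos rfl, ih, gSpec, List.count_cons,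
        Prod.mk.injEq]
      refine ⟨by simp, ?_⟩
      rcases Nat.mod_two_eq_zero_or_one (t.count '`') with h | h <;>
        cases b <;> simp [Nat.add_mod, h]
    · by_cases hq : c = '\''
      · subst hq
        simp [List.foldl_cons, ih, gSpec]
      · simp [List.foldl_cons, hc, hq, ih, gSpec]

-- interleave the segments after the first with alternating quotes, starting at index n
def ileave : List (List Char) → Nat → List Char
  | [], _ => []
  | s :: t, n => (if n % 2 == 0 then '\u2018' else '\u2019') :: (s ++ ileave t (n + 1))

-- B's fold characterised ('pieces.append(…); pieces.append(…)' = extend by two elements)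
theorem foldB_eq (xs : List (List Char × Nat)) (acc : List (List Char)) :
    xs.foldl
      (fun (acc : List (List Char)) (p : List Char × Nat) =>
        acc ++ [if p.2 % 2 == 0 then ['\u2018'] else ['\u2019']] ++ [p.1]) acc
    = acc ++ xs.flatMap (fun p => [if p.2 % 2 == 0 then ['\u2018'] else ['\u2019'], p.1]) := by
  induction xs generalizing acc with
  | nil => simp
  | cons x t ih => rw [List.foldl_cons, ih]; simp

theorem ileave_eq (r : List (List Char)) (n : Nat) :
    ((r.zipIdx n).flatMap
      (fun p => [if p.2 % 2 == 0 then ['\u2018'] else ['\u2019'], p.1])).flatten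
    = ileave r n := by
  induction r generalizing n with
  | nil => simp [ileave]
  | cons s t ih =>
    rw [List.zipIdx_cons, List.flatMap_cons, List.flatten_append, ih]
    rcases Nat.mod_two_eq_zero_or_one n with h | h <;> simp [ileave, h]

-- B's split + interleave equals the common spec, and the segment count is backticks + 1
theorem split_eq (l : List Char) (n : Nat) :
    (List.splitOnP (fun x => x == '`') (l.map (fun c => if c = '\'' then '\u2019' else c))).headD []
      ++ ileave (List.splitOnP (fun x => x == '`') (l.map (fun c => if c = '\'' then '\u2019' else c))).tail n
      = gSpec l (n % 2 == 1)
    ∧ (List.splitOnP (fun x => x == '`') (l.map (fun c => if c = '\'' then '\u2019' else c))).length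
      = l.count '`' + 1 := by
  induction l generalizing n with
  | nil => simp [List.splitOnP_nil, ileave, gSpec]
  | cons c t ih =>
    by_cases hc : c = '`'
    · subst hc
      obtain ⟨h1, h2⟩ := ih (n + 1)
      rcases hne : List.splitOnP (fun x => x == '`')
          (t.map (fun c => if c = '\'' then '\u2019' else c)) with _ | ⟨h', r'⟩
      · exact absurd hne (List.splitOnP_ne_nil _ _)
      · rw [hne] at h1 h2
        rw [List.map_cons, if_neg (by decide : ¬ ('`' = '\'')), List.splitOnP_cons]
        rw [if_pos (by decide), hne]
        constructor
        · show [] ++ ileave (h' :: r') n = gSpec ('`' :: t) (n % 2 == 1)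
          rw [List.nil_append, ileave, gSpec, if_pos rfl]
          rw [show h' ++ ileave r' (n + 1) = gSpec t ((n + 1) % 2 == 1) from h1]
          rcases Nat.mod_two_eq_zero_or_one n with h | h <;>
            simp [Nat.add_mod, h]
        · rw [List.length_cons, h2, List.count_cons]
          simp
    · have hφ : ((if c = '\'' then '\u2019' else c) == '`') = false := by
        by_cases hq : c = '\'' <;> simp [hq, hc]
      obtain ⟨h1, h2⟩ := ih n
      rcases hne : List.splitOnP (fun x => x == '`')
          (t.map (fun c => if c = '\'' then '\u2019' else c)) with _ | ⟨h', r'⟩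
      · exact absurd hne (List.splitOnP_ne_nil _ _)
      · rw [hne] at h1 h2
        rw [List.map_cons, List.splitOnP_cons, hφ, if_neg (by simp), hne,
          List.modifyHead]
        constructor
        · show ((if c = '\'' then '\u2019' else c) :: h') ++ ileave r' n
            = gSpec (c :: t) (n % 2 == 1)
          rw [List.cons_append, gSpec, if_neg hc]
          simp only [List.headD, List.tail] at h1
          rw [h1]
        · rw [List.count_cons, if_neg (by simp [hc] : ¬ ((c == '`') = true))]
          simpa using h2

-- both ports rewritten to the common normal form
theorem A_eq (text : String) :
    normalize_quotes text
      = String.mk (gSpec text.toList false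
          ++ if text.toList.count '`' % 2 == 1 then ['\u2019'] else []) := by
  simp only [normalize_quotes, foldA_eq, List.nil_append, Bool.false_xor]
  cases h : (text.toList.count '`' % 2 == 1) <;> simp [h]

theorem B_eq (text : String) :
    normalize_quotes_alt text
      = String.mk (gSpec text.toList false
          ++ if text.toList.count '`' % 2 == 1 then ['\u2019'] else []) := by
  obtain ⟨h1, h2⟩ := split_eq text.toList 0
  have h1' : (List.splitOnP (fun x => x == '`')
        (text.toList.map (fun c => if c = '\'' then '\u2019' else c))).headD []
      ++ ileave (List.splitOnP (fun x => x == '`')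
        (text.toList.map (fun c => if c = '\'' then '\u2019' else c))).tail 0
      = gSpec text.toList false := h1
  have hcond : ((List.splitOnP (fun x => x == '`')
        (text.toList.map (fun c => if c = '\'' then '\u2019' else c))).length % 2 == 0)
      = (text.toList.count '`' % 2 == 1) := by
    rw [h2]
    rcases Nat.mod_two_eq_zero_or_one (text.toList.count '`') with h | h <;>
      simp [Nat.add_mod, h]
  simp only [normalize_quotes_alt, foldB_eq, hcond]
  cases h : (text.toList.count '`' % 2 == 1) <;>
    · rw [if_congr (Iff.rfl) rfl rfl]
      simp only [h, Bool.false_eq_true, if_false, if_true,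
        List.flatten_append, List.flatten_cons, List.flatten_nil,
        List.append_nil, List.nil_append]
      rw [ileave_eq, h1']

-- ===== VERDICT (by name: the statement is the Claim_ definition above) =====
theorem normalize_quotes_spec : Claim_equal_normalize_quotes := by
  intro text _
  unfold Spec_normalize_quotes
  rw [A_eq, B_eq]
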